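-- pv_equiv track=rewrite | github.com/pypi-data/pypi-mirror-401 | packages/imas-simdb/imas_simdb-0.14.1.tar.gz/imas_simdb-0.14.1/docs/generate_cli_docs.py | extract_sub_commands
-- ===== SOURCE A (Python) =====
-- def extract_sub_commands(output: str) -> list[str]:
--     in_commands = False
--     sub_commands = []
--     for line in output.split('\n'):
--         if in_commands:
--             if line:
--                 sub_commands.append(line.split()[0])
--         if line == 'Commands:':
--             in_commands = True
--     return sub_commands
-- ===== SOURCE B (Python) =====
-- def extract_sub_commands(output: str) -> list[str]:
--     lines = output.split('\n')
--     try: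
--         start = lines.index('Commands:')
--     except ValueError:
--         return []
--     return [line.split()[0] for line in lines[start + 1:] if line]
-- ===== Notes on version B (the rewrite author's own statement) =====
-- stated objective: simpler
-- what changed: Replaces the one-pass boolean state machine with a locate-then-slice decomposition: find the section header line with list.index, slice the lines after it, and extract first words with a comprehension.
import Mathlib
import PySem

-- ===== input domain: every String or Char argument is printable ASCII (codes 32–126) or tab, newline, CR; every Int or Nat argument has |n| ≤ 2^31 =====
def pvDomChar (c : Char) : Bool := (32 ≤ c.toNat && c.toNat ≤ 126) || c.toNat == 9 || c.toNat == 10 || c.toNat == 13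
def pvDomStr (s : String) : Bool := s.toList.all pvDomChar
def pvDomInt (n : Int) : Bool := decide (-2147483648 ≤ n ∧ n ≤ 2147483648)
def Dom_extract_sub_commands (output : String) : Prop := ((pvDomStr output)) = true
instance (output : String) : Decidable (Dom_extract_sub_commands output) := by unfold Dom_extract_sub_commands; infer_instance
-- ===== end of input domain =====

-- B replaces A's one-pass boolean state machine by locate-then-slice: find the first
-- section header line, slice the lines after it, extract first words by a comprehension.

-- line.split()[0]; Python raises IndexError when split() is empty (whitespace-only
-- non-empty line) — those inputs are excluded by Pre_ below, there headD "" is a placeholder.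
def pyFirstWord (line : String) : String := (PySem.Str.split₀ line).headD ""

-- ===== PORT A =====
def pvStepA (st : Bool × List String) (line : String) : Bool × List String :=
  let st := if st.1 then (if line ≠ "" then (st.1, st.2 ++ [pyFirstWord line]) else st) else st
  if line = "Commands:" then (true, st.2) else st

def extract_sub_commands (output : String) : List String :=
  (((PySem.Str.split? output "\n").getD []).foldl pvStepA (false, [])).2

-- ===== PORT B =====
def extract_sub_commands_alt (output : String) : List String :=
  let lines := (PySem.Str.split? output "\n").getD []
  match lines.idxOf? "Commands:" with
  | none => []
  | some start => ((lines.drop (start + 1)).filter (fun l => l ≠ "")).map pyFirstWord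

-- ===== PRECONDITION & SPEC =====
-- Pre_ excludes exactly the inputs where A (and B alike) raises IndexError in Python:
-- a whitespace-only non-empty line occurring after the first section header line.
def Pre_extract_sub_commands (output : String) : Prop :=
  ∀ l ∈ ((PySem.Str.split? output "\n").getD []).drop
        (((PySem.Str.split? output "\n").getD []).idxOf "Commands:" + 1),
    l ≠ "" → PySem.Str.split₀ l ≠ []
instance (output : String) : Decidable (Pre_extract_sub_commands output) := by
  unfold Pre_extract_sub_commands; infer_instance

def pvWitness_extract_sub_commands : String := "Usage: x\n\nCommands:\n  run a thing\n  stop it\n"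

def Spec_extract_sub_commands (output : String) (out : List String) : Prop := out = extract_sub_commands_alt output
instance (output : String) (out : List String) : Decidable (Spec_extract_sub_commands output out) := by unfold Spec_extract_sub_commands; infer_instance

-- ===== CLAIM (what is proved, stated in full; the proofs are below) =====
def Claim_equal_extract_sub_commands : Prop := ∀ (output : String), Dom_extract_sub_commands output → Pre_extract_sub_commands output → Spec_extract_sub_commands output (extract_sub_commands output)

-- ===== LEMMAS AND PROOFS =====

-- once the flag is true it stays true and every non-empty line contributes its first word
theorem pv_fold_true (ls : List String) (acc : List String) :
    ls.foldl pvStepA (true, acc)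
      = (true, acc ++ (ls.filter (fun l => l ≠ "")).map pyFirstWord) := by
  induction ls generalizing acc with
  | nil => simp
  | cons l t ih =>
      by_cases hl : l = ""
      · subst hl
        simp [pvStepA, ih]
      · by_cases hc : l = "Commands:" <;>
          simp [pvStepA, hl, hc, ih]

-- before the flag is set, A scans for the first 'Commands:' line
theorem pv_fold_false (ls : List String) (acc : List String) :
    ls.foldl pvStepA (false, acc)
      = match ls.idxOf? "Commands:" with
        | none => (false, acc)
        | some i => (true, acc ++ ((ls.drop (i + 1)).filter (fun l => l ≠ "")).map pyFirstWord) := by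
  induction ls generalizing acc with
  | nil => simp
  | cons l t ih =>
      by_cases hc : l = "Commands:"
      · subst hc
        simp [pvStepA, List.idxOf?_cons, pv_fold_true]
      · have : ((l :: t).idxOf? "Commands:") = (t.idxOf? "Commands:").map (· + 1) := by
          simp [List.idxOf?_cons, hc]
        rw [this]
        have hstep : pvStepA (false, acc) l = (false, acc) := by
          simp [pvStepA, hc]
        simp only [List.foldl_cons, hstep, ih]
        cases t.idxOf? "Commands:" <;> simp

-- ===== VERDICT (by name: the statement is the Claim_ definition above) =====
theorem extract_sub_commands_spec : Claim_equal_extract_sub_commands := by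
  intro output _ _
  unfold Spec_extract_sub_commands extract_sub_commands extract_sub_commands_alt
  rw [pv_fold_false]
  cases h : ((PySem.Str.split? output "\n").getD []).idxOf? "Commands:" <;> simp [h]
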